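-- pv_equiv track=rewrite | github.com/szmania/cecli | cecli/helpers/requests.py | concatenate_user_messages
-- ===== SOURCE A (Python) =====
-- def concatenate_user_messages(messages):
--     """Concatenate user messages separated by assistant "(empty response)" messages.
--
--     This function iterates through the messages array, collecting sequences of
--     user messages and assistant "(empty response)" messages. All collected user
--     messages in a sequence are concatenated into a single user message.
--
--     Args:
--         messages: List of message dictionaries
--
--     Returns:
--         List of messages with concatenated user messages
--     """
--     if not messages:
--         return messages
--
--     result = []
--     user_messages_to_concat = []
--
--     def get_text(c):
--         if isinstance(c, str):
--             return c
--         if isinstance(c, list) and len(c) > 0: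
--             return c[0].get("text", "") if isinstance(c[0], dict) else str(c[0])
--         return str(c)
--
--     def flush_user_messages():
--         if user_messages_to_concat:
--             concatenated_content = "\n".join(get_text(c) for c in user_messages_to_concat)
--             result.append({"role": "user", "content": concatenated_content})
--             user_messages_to_concat.clear()
--
--     for msg in messages:
--         role = msg.get("role")
--         content = msg.get("content", "")
--
--         if role == "user" and not isinstance(content, list):
--             user_messages_to_concat.append(content)
--         elif role == "assistant" and content == "(empty response)":
--             continue
--         else:
--             flush_user_messages()
--             result.append(msg)
--
--     flush_user_messages()
--     return result
-- ===== SOURCE B (Python) =====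
-- def concatenate_user_messages(messages):
--     """Run-grouping rewrite: group maximal runs of concat-eligible messages
--     (user messages with non-list content, or assistant "(empty response)"
--     messages) and emit one merged user message per run that contains any
--     user text; other messages pass through unchanged."""
--
--     def get_text(c):
--         if isinstance(c, str):
--             return c
--         if isinstance(c, list) and len(c) > 0:
--             return c[0].get("text", "") if isinstance(c[0], dict) else str(c[0])
--         return str(c)
--
--     def eligible(m):
--         role = m.get("role")
--         content = m.get("content", "")
--         return (role == "user" and not isinstance(content, list)) or (
--             role == "assistant" and content == "(empty response)"
--         )
--
--     out = []
--     i, n = 0, len(messages)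
--     while i < n:
--         if eligible(messages[i]):
--             j = i
--             while j < n and eligible(messages[j]):
--                 j += 1
--             run = messages[i:j]
--             texts = [get_text(m.get("content", "")) for m in run if m.get("role") == "user"]
--             if texts:
--                 out.append({"role": "user", "content": "\n".join(texts)})
--             i = j
--         else:
--             out.append(messages[i])
--             i += 1
--     return out
-- ===== Notes on version B (the rewrite author's own statement) =====
-- stated objective: alternative
-- what changed: Replaces A's flat accumulator/flush state machine with a run-grouping forward scan: classify each message as concat-eligible, take each maximal eligible run at once, and emit one merged user message per run that collected any user text.
import Mathlib
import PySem

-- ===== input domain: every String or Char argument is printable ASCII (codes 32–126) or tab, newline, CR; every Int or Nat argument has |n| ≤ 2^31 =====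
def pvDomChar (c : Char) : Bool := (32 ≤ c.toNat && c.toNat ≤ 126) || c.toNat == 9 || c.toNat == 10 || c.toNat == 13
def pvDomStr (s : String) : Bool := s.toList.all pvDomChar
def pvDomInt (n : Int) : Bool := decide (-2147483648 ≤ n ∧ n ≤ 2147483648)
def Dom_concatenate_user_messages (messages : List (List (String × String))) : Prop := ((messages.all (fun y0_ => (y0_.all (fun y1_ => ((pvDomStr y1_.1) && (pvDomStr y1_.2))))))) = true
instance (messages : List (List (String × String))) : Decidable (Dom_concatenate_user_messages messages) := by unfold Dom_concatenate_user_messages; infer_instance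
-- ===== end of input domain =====

-- B replaces A's accumulator/flush state machine by a run-grouping forward scan (objective: alternative, same cost).
-- Under the type convention content is always a String, so A's 'get_text' is the identity and
-- 'isinstance(content, list)' is always False; both ports reflect that.

-- ===== PORT A =====
-- flush_user_messages: appends the merged user message to result if any texts are pending
def pvFlushA (res : List (List (String × String))) (pending : List String) : List (List (String × String)) :=
  if pending = [] then res
  else res ++ [[("role", "user"), ("content", PySem.Str.join "\n" pending)]]

-- one iteration of A's for-loop over the state (result, user_messages_to_concat)
def pvStepA (st : List (List (String × String)) × List String) (msg : List (String × String)) :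
    List (List (String × String)) × List String :=
  let role := (PySem.Dict.mk msg).get? "role"
  let content := (PySem.Dict.mk msg).getD "content" ""
  if role == some "user" then (st.1, st.2 ++ [content])          -- content is a String, never a list
  else if role == some "assistant" && content == "(empty response)" then st
  else (pvFlushA st.1 st.2 ++ [msg], [])

def concatenate_user_messages (messages : List (List (String × String))) : List (List (String × String)) :=
  match messages with
  | [] => messages
  | _ =>
    let st := messages.foldl pvStepA ([], [])
    pvFlushA st.1 st.2

-- ===== PORT B =====
def pvEligible (msg : List (String × String)) : Bool :=
  let role := (PySem.Dict.mk msg).get? "role"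
  let content := (PySem.Dict.mk msg).getD "content" ""
  (role == some "user") || (role == some "assistant" && content == "(empty response)")

-- the user texts collected from one eligible run (get_text is the identity on Strings)
def pvUserTexts (run : List (List (String × String))) : List String :=
  (run.filter (fun m => (PySem.Dict.mk m).get? "role" == some "user")).map
    (fun m => (PySem.Dict.mk m).getD "content" "")

def concatenate_user_messages_alt : List (List (String × String)) → List (List (String × String))
  | [] => []
  | m :: rest =>
    if h : pvEligible m then
      let texts := pvUserTexts ((m :: rest).takeWhile pvEligible)
      (if texts = [] then []
       else [[("role", "user"), ("content", PySem.Str.join "\n" texts)]])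
        ++ concatenate_user_messages_alt ((m :: rest).dropWhile pvEligible)
    else
      m :: concatenate_user_messages_alt rest
termination_by msgs => msgs.length
decreasing_by
  · simp only [List.dropWhile_cons, h, if_pos]
    have := List.length_dropWhile_le pvEligible rest
    simp only [List.length_cons]; omega
  · simp

-- ===== PRECONDITION & SPEC =====
def Spec_concatenate_user_messages (messages : List (List (String × String))) (out : List (List (String × String))) : Prop := out = concatenate_user_messages_alt messages
instance (messages : List (List (String × String))) (out : List (List (String × String))) : Decidable (Spec_concatenate_user_messages messages out) := by unfold Spec_concatenate_user_messages; infer_instance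

-- ===== CLAIM (what is proved, stated in full; the proofs are below) =====
def Claim_equal_concatenate_user_messages : Prop := ∀ (messages : List (List (String × String))), Dom_concatenate_user_messages messages → Spec_concatenate_user_messages messages (concatenate_user_messages messages)

-- ===== LEMMAS AND PROOFS =====

-- flushing into an empty result (what a run emits)
def pvFlushL (pending : List String) : List (List (String × String)) :=
  if pending = [] then []
  else [[("role", "user"), ("content", PySem.Str.join "\n" pending)]]

-- common characterisation of both programs, by recursion over the remaining messages
def pvGo (pending : List String) : List (List (String × String)) → List (List (String × String))
  | [] => pvFlushL pending
  | m :: rest =>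
    let role := (PySem.Dict.mk m).get? "role"
    let content := (PySem.Dict.mk m).getD "content" ""
    if role == some "user" then pvGo (pending ++ [content]) rest
    else if role == some "assistant" && content == "(empty response)" then pvGo pending rest
    else pvFlushL pending ++ m :: pvGo [] rest

theorem pvFlushA_eq (res : List (List (String × String))) (pending : List String) :
    pvFlushA res pending = res ++ pvFlushL pending := by
  unfold pvFlushA pvFlushL
  split <;> simp

theorem foldA_eq_go (msgs : List (List (String × String)))
    (res : List (List (String × String))) (pending : List String) :
    pvFlushA (msgs.foldl pvStepA (res, pending)).1 (msgs.foldl pvStepA (res, pending)).2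
      = res ++ pvGo pending msgs := by
  induction msgs generalizing res pending with
  | nil => simpa [pvGo] using pvFlushA_eq res pending
  | cons m rest ih =>
    simp only [List.foldl_cons, pvGo]
    by_cases hu : ((PySem.Dict.mk m).get? "role" == some "user") = true
    · rw [show pvStepA (res, pending) m = (res, pending ++ [(PySem.Dict.mk m).getD "content" ""])
        by simp [pvStepA, hu]]
      simp only [hu, if_pos]
      exact ih res _
    · by_cases ha : (((PySem.Dict.mk m).get? "role" == some "assistant")
          && ((PySem.Dict.mk m).getD "content" "" == "(empty response)")) = true
      · rw [show pvStepA (res, pending) m = (res, pending) by simp [pvStepA, hu, ha]]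
        simp only [hu, ha, if_neg, if_pos, Bool.false_eq_true, not_false_eq_true]
        exact ih res pending
      · rw [show pvStepA (res, pending) m = (pvFlushA res pending ++ [m], [])
          by simp [pvStepA, hu, ha]]
        simp only [hu, ha, if_neg, Bool.false_eq_true, not_false_eq_true]
        rw [ih, pvFlushA_eq]
        simp

-- B takes a (possibly empty) maximal eligible run off the front
theorem alt_nil : concatenate_user_messages_alt [] = [] := by
  rw [concatenate_user_messages_alt]

theorem alt_cons_neg (m : List (String × String)) (rest : List (List (String × String)))
    (h : pvEligible m = false) :
    concatenate_user_messages_alt (m :: rest) = m :: concatenate_user_messages_alt rest := by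
  rw [concatenate_user_messages_alt]
  simp [h]

theorem alt_run (msgs : List (List (String × String))) :
    concatenate_user_messages_alt msgs
      = pvFlushL (pvUserTexts (msgs.takeWhile pvEligible))
          ++ concatenate_user_messages_alt (msgs.dropWhile pvEligible) := by
  match msgs with
  | [] => simp [alt_nil, pvUserTexts, pvFlushL]
  | m :: rest =>
    by_cases h : pvEligible m = true
    · rw [concatenate_user_messages_alt]
      simp only [h, dite_true, pvFlushL]
    · simp [h, pvUserTexts, pvFlushL, List.takeWhile_cons, List.dropWhile_cons]

theorem go_eq_alt (msgs : List (List (String × String))) (pending : List String) :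
    pvGo pending msgs
      = pvFlushL (pending ++ pvUserTexts (msgs.takeWhile pvEligible))
          ++ concatenate_user_messages_alt (msgs.dropWhile pvEligible) := by
  induction msgs generalizing pending with
  | nil => simp [pvGo, pvUserTexts, alt_nil]
  | cons m rest ih =>
    by_cases hu : ((PySem.Dict.mk m).get? "role" == some "user") = true
    · have he : pvEligible m = true := by simp [pvEligible, hu]
      rw [pvGo]
      simp only [hu, if_pos, List.takeWhile_cons, List.dropWhile_cons, he, ih]
      have : pvUserTexts (m :: rest.takeWhile pvEligible)
          = (PySem.Dict.mk m).getD "content" "" :: pvUserTexts (rest.takeWhile pvEligible) := by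
        simp [pvUserTexts, hu]
      rw [this]
      simp
    · by_cases ha : (((PySem.Dict.mk m).get? "role" == some "assistant")
          && ((PySem.Dict.mk m).getD "content" "" == "(empty response)")) = true
      · have he : pvEligible m = true := by simp_all [pvEligible]
        rw [pvGo]
        simp only [hu, ha, if_neg, if_pos, Bool.false_eq_true, not_false_eq_true,
          List.takeWhile_cons, List.dropWhile_cons, he, ih]
        have : pvUserTexts (m :: rest.takeWhile pvEligible)
            = pvUserTexts (rest.takeWhile pvEligible) := by
          simp [pvUserTexts, hu]
        rw [this]
      · have he : pvEligible m = false := by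
          simp only [pvEligible]
          simp_all
        rw [pvGo]
        simp only [hu, ha, if_neg, Bool.false_eq_true, not_false_eq_true,
          List.takeWhile_cons, List.dropWhile_cons, he]
        rw [ih [], alt_cons_neg m rest he]
        simp only [List.nil_append, ← alt_run rest]
        simp [pvUserTexts, pvFlushL]

-- ===== VERDICT (by name: the statement is the Claim_ definition above) =====
theorem concatenate_user_messages_spec : Claim_equal_concatenate_user_messages := by
  intro messages _
  unfold Spec_concatenate_user_messages
  match messages with
  | [] => simp [concatenate_user_messages, alt_nil]
  | m :: rest =>
    show pvFlushA _ _ = _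
    rw [foldA_eq_go (m :: rest) [] [], List.nil_append, go_eq_alt, List.nil_append,
      ← alt_run]
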